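-- pv_equiv track=rewrite | github.com/clatux/ricette-python | app.py | get_categorie
-- ===== SOURCE A (Python) =====
-- def get_categorie(ricette):
--     """
--     Restituisce le categorie in ordine personalizzato,
--     senza duplicati, senza spazi, con maiuscola corretta.
--     """
--
--     ordine = [
--         "Primi",
--         "Secondi",
--         "Contorni",
--         "Dolci",
--         "Lievitazioni",
--         "Pane",
--         "Antipasti",
--         "Pizze",
--         "Torte",
--     ]
--
--     trovate = set()
--
--     for r in ricette:
--         cat = r.get("categoria", "").strip().capitalize()
--         if cat:
--             trovate.add(cat)
--
--     # categorie nell'ordine desiderato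
--     ordinate = [c for c in ordine if c in trovate]
--
--     # categorie non previste → in fondo
--     extra = [c for c in trovate if c not in ordine]
--
--     return ordinate + extra
-- ===== SOURCE B (Python) =====
-- def get_categorie(ricette):
--     """
--     Restituisce le categorie in ordine personalizzato,
--     senza duplicati, senza spazi, con maiuscola corretta.
--     """
--
--     ordine = [
--         "Primi",
--         "Secondi",
--         "Contorni",
--         "Dolci",
--         "Lievitazioni",
--         "Pane",
--         "Antipasti",
--         "Pizze",
--         "Torte",
--     ]
--
--     rank = {c: i for i, c in enumerate(ordine)}
--
--     trovate = []
--     for r in ricette: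
--         cat = r.get("categoria", "").strip().capitalize()
--         if cat and cat not in trovate:
--             trovate.append(cat)
--
--     # known categories take their fixed rank; unknown ones share one sentinel
--     # rank, so the stable sort keeps them in first-appearance order at the end
--     return sorted(trovate, key=lambda c: rank.get(c, len(ordine)))
-- ===== Notes on version B (the rewrite author's own statement) =====
-- stated objective: idiomatic
-- what changed: A builds a hash set and then makes two passes (one over the fixed order list, one over the set) concatenating the results; B builds the distinct normalized categories in first-appearance order and returns one stable sort keyed by each category's rank in the fixed order (sentinel rank for unknown ones). Pre_ excludes inputs yielding two or more distinct categories outside the fixed list, where the tail of A's result is Python's hash-seed-dependent set iteration order, an accidental and nondeterministic corner.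
import Mathlib
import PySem

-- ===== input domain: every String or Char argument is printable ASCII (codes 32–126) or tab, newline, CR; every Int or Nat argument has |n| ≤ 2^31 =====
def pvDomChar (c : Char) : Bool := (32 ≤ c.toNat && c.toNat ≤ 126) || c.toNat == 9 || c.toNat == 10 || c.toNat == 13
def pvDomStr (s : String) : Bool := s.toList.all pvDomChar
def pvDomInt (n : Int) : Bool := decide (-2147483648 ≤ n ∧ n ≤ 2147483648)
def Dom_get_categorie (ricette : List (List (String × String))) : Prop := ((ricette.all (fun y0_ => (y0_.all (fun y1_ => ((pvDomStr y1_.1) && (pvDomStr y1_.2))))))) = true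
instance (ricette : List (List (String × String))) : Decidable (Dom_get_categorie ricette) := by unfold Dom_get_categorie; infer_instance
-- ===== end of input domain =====

-- B replaces A's two concatenated passes (fixed-order pass + set pass) by one stable sort
-- of the first-appearance-ordered distinct categories under a rank key (idiomatic; same cost).

-- shared helpers: the fixed order list and the normalization r.get("categoria","").strip().capitalize(),
-- identical sub-expressions of both Pythons
def pvOrdine : List String :=
  ["Primi", "Secondi", "Contorni", "Dolci", "Lievitazioni", "Pane", "Antipasti", "Pizze", "Torte"]

-- hand port of str.capitalize(): first character upper-cased, the rest lower-cased (exact on ASCII)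
def pvCapitalize (s : String) : String :=
  match s.toList with
  | [] => ""
  | c :: cs => String.ofList (PySem.Chars.upper [c] ++ PySem.Chars.lower cs)

def pvNormCat (r : List (String × String)) : String :=
  pvCapitalize (PySem.Str.strip (PySem.Dict.getD (PySem.Dict.mk r) "categoria" ""))

-- ===== PORT A =====
def get_categorie (ricette : List (List (String × String))) : List String :=
  let trovate : PySem.Set String :=
    ricette.foldl (fun s r =>
      let cat := pvNormCat r
      if cat ≠ "" then PySem.Set.add s cat else s) PySem.Set.empty
  let ordinate := pvOrdine.filter (fun c => PySem.Set.contains trovate c)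
  let extra := trovate.filter (fun c => !(pvOrdine.contains c))
  ordinate ++ extra

-- ===== PORT B =====
-- rank = {c: i for i, c in enumerate(ordine)}
def pvRank : PySem.Dict String Int :=
  (PySem.List.enumerate pvOrdine).foldl (fun d p => d.insert p.2 p.1) PySem.Dict.empty

def get_categorie_alt (ricette : List (List (String × String))) : List String :=
  let trovate : List String :=
    ricette.foldl (fun acc r =>
      let cat := pvNormCat r
      if cat ≠ "" then (if acc.contains cat then acc else acc ++ [cat]) else acc) []
  PySem.List.sorted trovate (fun c => PySem.Dict.getD pvRank c (pvOrdine.length : Int)) false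

-- ===== PRECONDITION & SPEC =====
-- Pre_ excludes inputs whose normalized categories include two or more distinct strings outside the
-- fixed order list: there the tail of A's result is Python's hash-seed-dependent set iteration
-- order — an accidental, nondeterministic corner no port can be faithful to.
def Pre_get_categorie (ricette : List (List (String × String))) : Prop :=
  ((PySem.List.dedup ((ricette.map pvNormCat).filter (fun c => c ≠ ""))).filter
      (fun c => !(pvOrdine.contains c))).length ≤ 1
instance (ricette : List (List (String × String))) : Decidable (Pre_get_categorie ricette) := by
  unfold Pre_get_categorie; infer_instance

def pvWitness_get_categorie : (List (List (String × String))) :=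
  [[("categoria", " primi ")], [("categoria", "Boh")], [("titolo", "x")]]

def Spec_get_categorie (ricette : List (List (String × String))) (out : List String) : Prop := out = get_categorie_alt ricette
instance (ricette : List (List (String × String))) (out : List String) : Decidable (Spec_get_categorie ricette out) := by unfold Spec_get_categorie; infer_instance

-- ===== CLAIM (what is proved, stated in full; the proofs are below) =====
def Claim_equal_get_categorie : Prop := ∀ (ricette : List (List (String × String))), Dom_get_categorie ricette → Pre_get_categorie ricette → Spec_get_categorie ricette (get_categorie ricette)

-- ===== LEMMAS AND PROOFS =====

-- the sort key of B's port, named for the proofs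
def pvKey (c : String) : Int := PySem.Dict.getD pvRank c (pvOrdine.length : Int)

-- A's guarded set-building loop is Set.add folded over the non-empty normalized categories
theorem pv_foldA (f : List (String × String) → String)
    (l : List (List (String × String))) (s0 : PySem.Set String) :
    l.foldl (fun s r => let cat := f r; if cat ≠ "" then PySem.Set.add s cat else s) s0
      = ((l.map f).filter (fun c => c ≠ "")).foldl PySem.Set.add s0 := by
  induction l generalizing s0 with
  | nil => rfl
  | cons r t ih =>
      simp only [List.foldl_cons, List.map_cons, List.filter_cons]
      by_cases h : f r = ""
      · simpa [h] using ih s0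
      · simpa [h] using ih (PySem.Set.add s0 (f r))

-- core fact: for a duplicate-free T with at most one element outside pvOrdine,
-- A's two concatenated passes equal B's stable sort under the rank key
theorem pv_main (T : List String) (hnd : T.Nodup)
    (hpre : (T.filter (fun c => !(pvOrdine.contains c))).length ≤ 1) :
    pvOrdine.filter (fun c => PySem.Set.contains T c) ++ T.filter (fun c => !(pvOrdine.contains c))
      = PySem.List.sorted T pvKey false := by
  have hordnd : pvOrdine.Nodup := by decide
  have hpair : pvOrdine.Pairwise (fun a b => pvKey a < pvKey b) := by decide
  have hlt9 : ∀ c ∈ pvOrdine, pvKey c < 9 := by decide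
  have hkey9 : ∀ c : String, c ∉ pvOrdine → pvKey c = 9 := by
    intro c h
    unfold pvKey
    rw [PySem.Dict.getD_of_not_contains]
    · rfl
    · rw [PySem.Dict.contains_eq_decide_mem_keys]
      simp [show pvRank.keys = pvOrdine from by decide, h]
  have hc : (fun c => PySem.Set.contains T c) = (fun c => T.contains c) := rfl
  have hperm1 : (pvOrdine.filter (fun c => T.contains c)).Perm
      (T.filter (fun c => pvOrdine.contains c)) := by
    apply (List.perm_ext_iff_of_nodup (hordnd.filter _) (hnd.filter _)).mpr
    intro x
    simp [List.mem_filter, And.comm]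
  have hperm : (pvOrdine.filter (fun c => T.contains c)
      ++ T.filter (fun c => !(pvOrdine.contains c))).Perm T :=
    (hperm1.append_right _).trans (List.filter_append_perm _ T)
  have hp1 : (pvOrdine.filter (fun c => T.contains c)).Pairwise (fun a b => pvKey a < pvKey b) :=
    hpair.filter _
  have hp2 : (T.filter (fun c => !(pvOrdine.contains c))).Pairwise (fun a b => pvKey a < pvKey b) := by
    rcases e : T.filter (fun c => !(pvOrdine.contains c)) with _ | ⟨x, _ | _⟩ <;> simp_all
  have hcross : ∀ a ∈ pvOrdine.filter (fun c => T.contains c),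
      ∀ b ∈ T.filter (fun c => !(pvOrdine.contains c)), pvKey a < pvKey b := by
    intro a ha b hb
    have ha' : a ∈ pvOrdine := (List.mem_filter.mp ha).1
    have hb' : b ∉ pvOrdine := by
      have := (List.mem_filter.mp hb).2; simpa using this
    rw [hkey9 b hb']
    exact hlt9 a ha'
  have hpairs : (pvOrdine.filter (fun c => T.contains c)
      ++ T.filter (fun c => !(pvOrdine.contains c))).Pairwise (fun a b => pvKey a < pvKey b) :=
    List.pairwise_append.mpr ⟨hp1, hp2, hcross⟩
  rw [hc]
  exact (PySem.List.sorted_eq_of_perm_of_pairwise_lt _ _ pvKey hperm hpairs).symm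

-- ===== VERDICT (by name: the statement is the Claim_ definition above) =====
theorem get_categorie_spec : Claim_equal_get_categorie := by
  intro ricette _ hpre
  unfold Spec_get_categorie get_categorie get_categorie_alt
  have hA : (ricette.foldl (fun s r => let cat := pvNormCat r;
        if cat ≠ "" then PySem.Set.add s cat else s) PySem.Set.empty)
      = PySem.Set.ofList ((ricette.map pvNormCat).filter (fun c => c ≠ "")) := by
    rw [pv_foldA, PySem.Set.ofList_eq_foldl]; rfl
  have hB : (ricette.foldl (fun acc r => let cat := pvNormCat r;
        if cat ≠ "" then (if acc.contains cat then acc else acc ++ [cat]) else acc) [])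
      = PySem.Set.ofList ((ricette.map pvNormCat).filter (fun c => c ≠ "")) := hA
  simp only [hA, hB]
  have hpre' : ((PySem.Set.ofList ((ricette.map pvNormCat).filter (fun c => c ≠ ""))).filter
      (fun c => !(pvOrdine.contains c))).length ≤ 1 := by
    unfold Pre_get_categorie at hpre
    simpa [PySem.List.dedup_eq_ofList] using hpre
  exact pv_main _ (PySem.Set.nodup_ofList _) hpre'
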